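-- pv_equiv track=rewrite | github.com/makichiis/tello-edu-py | test.py | to_argv
-- ===== SOURCE A (Python) =====
-- from typing import (List)
--
-- def to_argv(s: str) -> List[str]:
--     argv: List[str] = []
--     current_arg = ''
--     insq_flag: bool = False
--
--     for char in s:
--         if char.isspace() and not insq_flag:
--             if current_arg:
--                 argv.append(current_arg)
--                 current_arg = ''
--         elif char == '"':
--             insq_flag = not insq_flag
--         else:
--             current_arg += char
--
--     if current_arg:
--         argv.append(current_arg)
--
--     return argv
-- ===== SOURCE B (Python) =====
-- import re
--
-- # One token = a maximal run of quoted segments ("..." with optional close at EOS)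
-- # and unquoted non-space characters; quotes are dropped, empty tokens suppressed.
-- _TOKEN = re.compile(r'(?:"[^"]*"?|[^\s"]+)+')
--
-- def to_argv(s: str) -> list:
--     tokens = (m.replace('"', '') for m in _TOKEN.findall(s))
--     return [t for t in tokens if t]
-- ===== Notes on version B (the rewrite author's own statement) =====
-- stated objective: idiomatic
-- what changed: Replaces the per-character state machine (argv/current_arg/insq_flag) with a single regex findall of maximal tokens (quoted segments or runs of unquoted non-space characters), then strips quote characters and drops empty tokens.
import Mathlib
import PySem

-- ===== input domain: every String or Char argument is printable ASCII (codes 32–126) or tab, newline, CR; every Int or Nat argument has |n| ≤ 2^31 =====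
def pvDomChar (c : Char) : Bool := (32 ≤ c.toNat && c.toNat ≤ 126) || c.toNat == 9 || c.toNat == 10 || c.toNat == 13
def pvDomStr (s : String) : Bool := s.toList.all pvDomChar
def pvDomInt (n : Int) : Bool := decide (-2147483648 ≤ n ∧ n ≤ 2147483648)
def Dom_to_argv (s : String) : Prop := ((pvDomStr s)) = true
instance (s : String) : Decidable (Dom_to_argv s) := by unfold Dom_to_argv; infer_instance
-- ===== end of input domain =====

-- B tokenizes with one regex-style maximal-munch scan (quoted segments / plain runs), then strips quotes and drops empty tokens — more idiomatic than A's per-character flag machine.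


-- ===== PORT A =====
-- loop body; state = (argv, current_arg, insq_flag); current_arg kept as List Char, String.ofList at the end
def pvStepA (st : List (List Char) × List Char × Bool) (c : Char) :
    List (List Char) × List Char × Bool :=
  let (argv, cur, insq) := st
  if PySem.Chars.isspace c && !insq then
    if cur ≠ [] then (argv ++ [cur], [], insq) else st
  else if c = '"' then (argv, cur, !insq)
  else (argv, cur ++ [c], insq)

def to_argv (s : String) : List String :=
  let (argv, cur, _) := s.toList.foldl pvStepA ([], [], false)
  (if cur ≠ [] then argv ++ [cur] else argv).map String.ofList

-- ===== PORT B =====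
-- hand port of B's regex  (?:"[^"]*"?|[^\s"]+)+  (leftmost, maximal munch; exact for this
-- regex: each alternative is consumed greedily and never needs backtracking).
-- "[^"]*"?  after an opening quote: everything up to and including the next quote (or to EOS)
def pvMunchQuoted : List Char → List Char × List Char
  | [] => ([], [])
  | c :: cs =>
    if c = '"' then (['"'], cs)
    else let (q, r) := pvMunchQuoted cs; (c :: q, r)

-- [^\s"]+ : a run of non-space non-quote characters
def pvMunchPlain : List Char → List Char × List Char
  | [] => ([], [])
  | c :: cs =>
    if c = '"' || PySem.Chars.isspace c then ([], c :: cs)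
    else let (t, r) := pvMunchPlain cs; (c :: t, r)

theorem pvMunchQuoted_snd_le : ∀ cs : List Char, (pvMunchQuoted cs).2.length ≤ cs.length := by
  intro cs
  induction cs with
  | nil => simp [pvMunchQuoted]
  | cons c cs ih =>
    simp only [pvMunchQuoted]
    split
    · simp
    · simpa using Nat.le_succ_of_le ih

theorem pvMunchPlain_snd_le : ∀ cs : List Char, (pvMunchPlain cs).2.length ≤ cs.length := by
  intro cs
  induction cs with
  | nil => simp [pvMunchPlain]
  | cons c cs ih =>
    simp only [pvMunchPlain]
    split
    · simp
    · simpa using Nat.le_succ_of_le ih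

-- one whole token (the (…)+ of the regex), assuming the head starts an alternative
def pvToken : List Char → List Char × List Char
  | [] => ([], [])
  | c :: cs =>
    if c = '"' then
      let m := pvMunchQuoted cs
      let t := pvToken m.2
      ('"' :: m.1 ++ t.1, t.2)
    else if PySem.Chars.isspace c then ([], c :: cs)
    else
      let m := pvMunchPlain cs
      let t := pvToken m.2
      (c :: m.1 ++ t.1, t.2)
termination_by cs => cs.length
decreasing_by
  · exact Nat.lt_succ_of_le (pvMunchQuoted_snd_le cs)
  · exact Nat.lt_succ_of_le (pvMunchPlain_snd_le cs)

theorem pvToken_snd_le_aux : ∀ (n : Nat) (cs : List Char), cs.length ≤ n →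
    (pvToken cs).2.length ≤ cs.length := by
  intro n
  induction n with
  | zero =>
    intro cs h
    have hcs : cs = [] := List.eq_nil_of_length_eq_zero (Nat.le_zero.mp h)
    subst hcs
    simp [pvToken]
  | succ n ih =>
    intro cs h
    match cs with
    | [] => simp [pvToken]
    | c :: cs =>
      by_cases hq : c = '"'
      · subst hq
        have h1 := pvMunchQuoted_snd_le cs
        have h2 := ih (pvMunchQuoted cs).2 (by simp at h; omega)
        simp only [pvToken, if_true, List.length_cons]
        omega
      · by_cases hs : PySem.Chars.isspace c = true
        · simp [pvToken, if_neg hq, hs]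
        · simp only [pvToken, if_neg hq, if_neg hs]
          have h1 := pvMunchPlain_snd_le cs
          have h2 := ih (pvMunchPlain cs).2 (by simp at h; omega)
          simp only [List.length_cons]
          omega

theorem pvToken_snd_le (cs : List Char) : (pvToken cs).2.length ≤ cs.length :=
  pvToken_snd_le_aux cs.length cs le_rfl

theorem pvToken_cons_snd_le (c : Char) (cs : List Char)
    (h : ¬ PySem.Chars.isspace c = true) : (pvToken (c :: cs)).2.length ≤ cs.length := by
  by_cases hq : c = '"'
  · subst hq
    have h1 := pvMunchQuoted_snd_le cs
    have h2 := pvToken_snd_le (pvMunchQuoted cs).2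
    simp only [pvToken, if_true]
    omega
  · simp only [pvToken, if_neg hq, if_neg h]
    have h1 := pvMunchPlain_snd_le cs
    have h2 := pvToken_snd_le (pvMunchPlain cs).2
    omega

-- re.findall of the token regex: skip whitespace, munch a token, repeat
def pvFindall : List Char → List (List Char)
  | [] => []
  | c :: cs =>
    if PySem.Chars.isspace c then pvFindall cs
    else (pvToken (c :: cs)).1 :: pvFindall (pvToken (c :: cs)).2
termination_by cs => cs.length
decreasing_by
  · simp
  · rename_i h
    exact Nat.lt_succ_of_le (pvToken_cons_snd_le c cs (by simpa using h))

-- m.replace('"', '') removes every '"' = filter; keep only non-empty results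
def to_argv_alt (s : String) : List String :=
  (((pvFindall s.toList).map (fun t => t.filter (fun c => c ≠ '"'))).filter
      (fun t => t ≠ [])).map String.ofList

-- ===== PRECONDITION & SPEC =====
def Spec_to_argv (s : String) (out : List String) : Prop := out = to_argv_alt s
instance (s : String) (out : List String) : Decidable (Spec_to_argv s out) := by unfold Spec_to_argv; infer_instance

-- ===== CLAIM (what is proved, stated in full; the proofs are below) =====
def Claim_equal_to_argv : Prop := ∀ (s : String), Dom_to_argv s → Spec_to_argv s (to_argv s)

-- ===== LEMMAS AND PROOFS =====

-- canonical form of A's fold: processes the rest of the string from state (cur, insq)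
def pvRunA : List Char → List Char → Bool → List (List Char)
  | [], cur, _ => if cur = [] then [] else [cur]
  | c :: cs, cur, insq =>
    if PySem.Chars.isspace c && !insq then
      (if cur = [] then [] else [cur]) ++ pvRunA cs [] false
    else if c = '"' then pvRunA cs cur (!insq)
    else pvRunA cs (cur ++ [c]) insq

def pvFinish (st : List (List Char) × List Char × Bool) : List (List Char) :=
  if st.2.1 ≠ [] then st.1 ++ [st.2.1] else st.1

theorem pvFoldA_eq_runA : ∀ (cs : List Char) (argv : List (List Char)) (cur : List Char) (insq : Bool),
    pvFinish (cs.foldl pvStepA (argv, cur, insq)) = argv ++ pvRunA cs cur insq := by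
  intro cs
  induction cs with
  | nil =>
    intro argv cur insq
    by_cases h : cur = [] <;> simp [pvFinish, pvRunA, h]
  | cons c cs ih =>
    intro argv cur insq
    simp only [List.foldl_cons, pvStepA, pvRunA]
    by_cases h1 : (PySem.Chars.isspace c && !insq) = true
    · rw [if_pos h1, if_pos h1]
      by_cases h2 : cur = []
      · have hi : insq = false := by
          cases insq <;> simp_all
        simp [h2, hi, ih]
      · have hi : insq = false := by
          cases insq <;> simp_all
        simp [if_pos h2, h2, hi, ih, List.append_assoc]
    · rw [if_neg h1, if_neg h1]
      by_cases h2 : c = '"'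
      · simp [h2, ih]
      · simp [h2, ih]

theorem pvRunA_quoted : ∀ (cs cur : List Char),
    pvRunA cs cur true =
      pvRunA (pvMunchQuoted cs).2 (cur ++ (pvMunchQuoted cs).1.filter (fun c => c ≠ '"')) false := by
  intro cs
  induction cs with
  | nil => intro cur; simp [pvMunchQuoted, pvRunA]
  | cons c cs ih =>
    intro cur
    by_cases hq : c = '"'
    · subst hq
      simp [pvRunA, pvMunchQuoted]
    · simp only [pvRunA, pvMunchQuoted, if_neg hq, Bool.not_true, Bool.and_false,
        Bool.false_eq_true, if_false]
      rw [ih]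
      simp [List.filter_cons, hq]
  -- (the flush branch is dead: insq = true makes the whitespace test false)

theorem pvRunA_plain : ∀ (cs cur : List Char),
    pvRunA cs cur false = pvRunA (pvMunchPlain cs).2 (cur ++ (pvMunchPlain cs).1) false := by
  intro cs
  induction cs with
  | nil => intro cur; simp [pvMunchPlain, pvRunA]
  | cons c cs ih =>
    intro cur
    by_cases hstop : (c = '"' || PySem.Chars.isspace c) = true
    · simp [pvMunchPlain, hstop]
    · have hq : ¬ c = '"' := by simp_all
      have hs : ¬ PySem.Chars.isspace c = true := by simp_all
      have hm : pvMunchPlain (c :: cs) = (c :: (pvMunchPlain cs).1, (pvMunchPlain cs).2) := by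
        simp [pvMunchPlain, hq, hs]
      have hr : pvRunA (c :: cs) cur false = pvRunA cs (cur ++ [c]) false := by
        simp [pvRunA, hs, hq]
      rw [hm, hr, ih]
      simp

theorem pvMunchPlain_no_quote : ∀ (cs : List Char), ∀ a ∈ (pvMunchPlain cs).1, ¬ a = '"' := by
  intro cs
  induction cs with
  | nil => simp [pvMunchPlain]
  | cons c cs ih =>
    by_cases hstop : (c = '"' || PySem.Chars.isspace c) = true
    · simp [pvMunchPlain, hstop]
    · have hq : ¬ c = '"' := by simp_all
      have hs : ¬ PySem.Chars.isspace c = true := by simp_all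
      have hm : pvMunchPlain (c :: cs) = (c :: (pvMunchPlain cs).1, (pvMunchPlain cs).2) := by
        simp [pvMunchPlain, hq, hs]
      rw [hm]
      intro a ha
      rcases List.mem_cons.mp ha with h | h
      · subst h; exact hq
      · exact ih a h

theorem pvRunA_token : ∀ (n : Nat) (cs : List Char), cs.length ≤ n → ∀ (cur : List Char),
    pvRunA cs cur false =
      (if cur ++ (pvToken cs).1.filter (fun c => c ≠ '"') = [] then []
       else [cur ++ (pvToken cs).1.filter (fun c => c ≠ '"')]) ++ pvRunA (pvToken cs).2 [] false := by
  intro n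
  induction n with
  | zero =>
    intro cs h cur
    have hcs : cs = [] := List.eq_nil_of_length_eq_zero (Nat.le_zero.mp h)
    subst hcs
    simp [pvToken, pvRunA]
  | succ n ih =>
    intro cs h cur
    match cs with
    | [] => simp [pvToken, pvRunA]
    | c :: cs =>
      by_cases hq : c = '"'
      · subst hq
        have hlen := pvMunchQuoted_snd_le cs
        simp only [pvToken, if_true]
        have hqs : PySem.Chars.isspace '"' = false := by decide
        have hrA : pvRunA ('"' :: cs) cur false = pvRunA cs cur true := by
          simp [pvRunA, hqs]
        rw [hrA, pvRunA_quoted cs cur,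
            ih (pvMunchQuoted cs).2 (by simp at h; omega) (cur ++ (pvMunchQuoted cs).1.filter (fun c => c ≠ '"'))]
        simp [List.filter_append, List.append_assoc, List.filter_cons]
      · by_cases hs : PySem.Chars.isspace c = true
        · -- token is empty, rest is c :: cs; both sides flush cur then continue
          simp only [pvToken, if_neg hq, if_pos hs]
          by_cases hc : cur = []
          · simp [hc, pvRunA, hs]
          · simp [pvRunA, hs, hc]
        · have hlen := pvMunchPlain_snd_le cs
          simp only [pvToken, if_neg hq, if_neg hs]
          have hrA : pvRunA (c :: cs) cur false = pvRunA cs (cur ++ [c]) false := by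
            simp [pvRunA, hs, hq]
          rw [hrA, pvRunA_plain cs (cur ++ [c]),
              ih (pvMunchPlain cs).2 (by simp at h; omega) ((cur ++ [c]) ++ (pvMunchPlain cs).1)]
          simp [List.filter_append, List.filter_cons, hq, List.append_assoc]
          exact (List.filter_eq_self.mpr fun a ha => by
            simpa using pvMunchPlain_no_quote cs a ha).symm

theorem pvRunA_findall : ∀ (n : Nat) (cs : List Char), cs.length ≤ n →
    pvRunA cs [] false =
      ((pvFindall cs).map (fun t => t.filter (fun c => c ≠ '"'))).filter (fun t => t ≠ []) := by
  intro n
  induction n with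
  | zero =>
    intro cs h
    have hcs : cs = [] := List.eq_nil_of_length_eq_zero (Nat.le_zero.mp h)
    subst hcs
    simp [pvFindall, pvRunA]
  | succ n ih =>
    intro cs h
    match cs with
    | [] => simp [pvFindall, pvRunA]
    | c :: cs =>
      by_cases hs : PySem.Chars.isspace c = true
      · have : pvRunA (c :: cs) [] false = pvRunA cs [] false := by simp [pvRunA, hs]
        rw [this, ih cs (by simp at h; omega)]
        simp [pvFindall, hs]
      · have hlen := pvToken_cons_snd_le c cs hs
        rw [pvRunA_token (c :: cs).length (c :: cs) le_rfl []]
        rw [ih (pvToken (c :: cs)).2 (by simp at h; omega)]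
        simp only [pvFindall, if_neg hs, List.map_cons, List.filter_cons]
        by_cases he : (pvToken (c :: cs)).1.filter (fun c => c ≠ '"') = []
        · have h1 : ∀ a ∈ (pvToken (c :: cs)).1, a = '"' := by
            simpa using List.filter_eq_nil_iff.mp he
          have h1' : ¬ ∃ x ∈ (pvToken (c :: cs)).1, ¬ x = '"' := by
            rintro ⟨x, hx, hne⟩
            exact hne (h1 x hx)
          simp [he, h1, h1']
        · have h2 : ∃ x ∈ (pvToken (c :: cs)).1, ¬ x = '"' := by
            simpa [List.filter_eq_nil_iff] using he
          have h2' : ¬ ∀ a ∈ (pvToken (c :: cs)).1, a = '"' := by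
            intro hall
            obtain ⟨x, hx, hne⟩ := h2
            exact hne (hall x hx)
          simp [he, h2, h2']

-- ===== VERDICT (by name: the statement is the Claim_ definition above) =====
theorem to_argv_spec : Claim_equal_to_argv := by
  intro s _
  unfold Spec_to_argv to_argv to_argv_alt
  have h1 := pvFoldA_eq_runA s.toList [] [] false
  have h2 := pvRunA_findall s.toList.length s.toList le_rfl
  simp only [List.nil_append] at h1
  rcases hst : s.toList.foldl pvStepA ([], [], false) with ⟨argv, cur, insq⟩
  rw [hst] at h1
  simp only [pvFinish] at h1
  simp only []
  rw [h1, h2]
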